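-- pv_equiv track=rewrite | github.com/grosenbe/bacula-connect | bconnect.py | decode_lstats
-- ===== SOURCE A (Python) =====
-- B64_VALS = {
--              '+': 62, '/': 63, '1': 53, '0': 52, '3': 55, '2': 54, '5': 57,
--              '4': 56, '7': 59, '6': 58, '9': 61, '8': 60, 'A': 0, 'C': 2,
--              'B': 1, 'E': 4, 'D': 3, 'G': 6, 'F': 5, 'I': 8, 'H': 7, 'K': 10,
--              'J': 9, 'M': 12, 'L': 11, 'O': 14, 'N': 13, 'Q': 16, 'P': 15,
--              'S': 18, 'R': 17, 'U': 20, 'T': 19, 'W': 22, 'V': 21, 'Y': 24,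
--              'X': 23, 'Z': 25, 'a': 26, 'c': 28, 'b': 27, 'e': 30, 'd': 29,
--              'g': 32, 'f': 31, 'i': 34, 'h': 33, 'k': 36, 'j': 35, 'm': 38,
--              'l': 37, 'o': 40, 'n': 39, 'q': 42, 'p': 41, 's': 44, 'r': 43,
--              'u': 46, 't': 45, 'w': 48, 'v': 47, 'y': 50, 'x': 49, 'z': 51
--            }
--
-- def decode_lstats(stats):
--     fields = "st_dev st_ino st_mode st_nlink st_uid st_gid st_rdev st_size st_blksize st_blocks st_atime st_mtime st_ctime LinkFI st_flags data".split()
--     out = {}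
--
--     for i, element in enumerate(stats.split()):
--         result = 0
--         for n, letter in enumerate(element):
--             if letter:
--                 result = result << 6
--                 result += B64_VALS[letter]
--         out[fields[i]] = result
--
--     return out
-- ===== SOURCE B (Python) =====
-- B64_ALPHABET = "ABCDEFGHIJKLMNOPQRSTUVWXYZabcdefghijklmnopqrstuvwxyz0123456789+/"
--
-- FIELDS = "st_dev st_ino st_mode st_nlink st_uid st_gid st_rdev st_size st_blksize st_blocks st_atime st_mtime st_ctime LinkFI st_flags data".split()
--
--
-- def _tokval(tok):
--     # value of one base-64 token: reverse pass with a running power-of-64 weight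
--     value = 0
--     mult = 1
--     for ch in reversed(tok):
--         value += B64_ALPHABET.index(ch) * mult
--         mult *= 64
--     return value
--
--
-- def _pairs(fields, tokens):
--     # recursively zip field names with token values into an ordered pair list
--     if not tokens:
--         return []
--     return [(fields[0], _tokval(tokens[0]))] + _pairs(fields[1:], tokens[1:])
--
--
-- def decode_lstats(stats):
--     return dict(_pairs(FIELDS, stats.split()))
-- ===== Notes on version B (the rewrite author's own statement) =====
-- stated objective: alternative
-- what changed: B drops the B64_VALS dict and the enumerate/insert loop entirely: each digit is the character's position in the base64 alphabet string, each token is valued by a reverse pass with a running power-of-64 weight instead of A's most-significant-first Horner shift, and the result dict is built in one shot from a recursively zipped (field, value) pair list instead of indexed insertions.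
import Mathlib
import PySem

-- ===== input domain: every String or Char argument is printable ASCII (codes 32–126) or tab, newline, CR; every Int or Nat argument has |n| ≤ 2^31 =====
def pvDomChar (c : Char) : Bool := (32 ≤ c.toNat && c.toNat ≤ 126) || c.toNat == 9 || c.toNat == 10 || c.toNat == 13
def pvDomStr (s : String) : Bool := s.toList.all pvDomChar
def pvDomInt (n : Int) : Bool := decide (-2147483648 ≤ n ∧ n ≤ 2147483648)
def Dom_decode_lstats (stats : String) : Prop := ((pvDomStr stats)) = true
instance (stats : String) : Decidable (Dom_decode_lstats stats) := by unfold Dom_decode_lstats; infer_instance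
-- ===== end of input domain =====

set_option maxRecDepth 8000


-- B drops the B64_VALS dict and the enumerate/insert loop: digits come from the
-- character's position in the base64 alphabet string, tokens are valued by a
-- reverse pass with a running power-of-64 weight, and the dict is built in one
-- shot from a recursively zipped (field, value) pair list (alternative).

-- ===== PORT A =====

-- the module constant B64_VALS (a dict literal with distinct keys, in source order)
def pvB64 : PySem.Dict Char Int := PySem.Dict.mk [('+', 62), ('/', 63), ('1', 53), ('0', 52), ('3', 55), ('2', 54), ('5', 57), ('4', 56), ('7', 59), ('6', 58), ('9', 61), ('8', 60), ('A', 0), ('C', 2), ('B', 1), ('E', 4), ('D', 3), ('G', 6), ('F', 5), ('I', 8), ('H', 7), ('K', 10), ('J', 9), ('M', 12), ('L', 11), ('O', 14), ('N', 13), ('Q', 16), ('P', 15), ('S', 18), ('R', 17), ('U', 20), ('T', 19), ('W', 22), ('V', 21), ('Y', 24), ('X', 23), ('Z', 25), ('a', 26), ('c', 28), ('b', 27), ('e', 30), ('d', 29), ('g', 32), ('f', 31), ('i', 34), ('h', 33), ('k', 36), ('j', 35), ('m', 38), ('l', 37), ('o', 40), ('n', 39), ('q', 42), ('p', 41), ('s',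 44), ('r', 43), ('u', 46), ('t', 45), ('w', 48), ('v', 47), ('y', 50), ('x', 49), ('z', 51)]

-- B64_VALS[c] ; none = KeyError
def pvVal? (c : Char) : Option Int := pvB64.get? c

-- fields = "...".split()
def pvFields : List String :=
  PySem.Str.split₀ "st_dev st_ino st_mode st_nlink st_uid st_gid st_rdev st_size st_blksize st_blocks st_atime st_mtime st_ctime LinkFI st_flags data"

-- one iteration of A's outer loop; the inner fold is A's Horner loop
-- ('if letter:' is always true for a character of a string and is dropped;
--  'result << 6' is 'result * 64'); none = a raised KeyError/IndexError
def pvStepA (st : Option (PySem.Dict String Int)) (p : Int × String) :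
    Option (PySem.Dict String Int) :=
  st.bind fun out =>
    (p.2.toList.foldl
        (fun r letter => r.bind fun x => (pvVal? letter).map fun v => x * 64 + v)
        (some 0)).bind fun result =>
      (PySem.List.pyGet? pvFields p.1).map fun f => out.insert f result

def decode_lstats (stats : String) : List (String × Int) :=
  (((PySem.List.enumerate (PySem.Str.split₀ stats) 0).foldl pvStepA
      (some PySem.Dict.empty)).map PySem.Dict.items).getD []

-- ===== PORT B =====

-- the module constant B64_ALPHABET
def pvAlpha : List Char := "ABCDEFGHIJKLMNOPQRSTUVWXYZabcdefghijklmnopqrstuvwxyz0123456789+/".toList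

-- B64_ALPHABET.index(ch) ; none = ValueError
def pvDigit? (c : Char) : Option Int := (PySem.List.index? pvAlpha c).map fun n => (n : Int)

-- _tokval: reverse pass carrying (value, mult); none = a raised ValueError
def pvTokVal? (t : List Char) : Option Int :=
  (t.reverse.foldl
      (fun r ch => r.bind fun vm => (pvDigit? ch).map fun d => (vm.1 + d * vm.2, vm.2 * 64))
      (some ((0 : Int), (1 : Int)))).map (·.1)

-- _pairs: recursive zip of field names with token values; fields[0] on an
-- exhausted field list = IndexError (none), fields[1:] is a slice
def pvPairs? : List String → List String → Option (List (String × Int))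
  | _, [] => some []
  | fs, t :: ts =>
      (PySem.List.pyGet? fs 0).bind fun f =>
        (pvTokVal? t.toList).bind fun v =>
          (pvPairs? (PySem.List.slice fs (some 1) none) ts).map fun rest => (f, v) :: rest

def decode_lstats_alt (stats : String) : List (String × Int) :=
  ((pvPairs? pvFields (PySem.Str.split₀ stats)).map
      (fun l => (PySem.Dict.ofList l).items)).getD []

-- ===== PRECONDITION & SPEC =====
-- Pre_ excludes exactly the inputs where the Python A raises: more than 16
-- whitespace-separated tokens (IndexError on fields[i]) or a character outside
-- the base-64 alphabet (KeyError in B64_VALS).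
def Pre_decode_lstats (stats : String) : Prop :=
  (PySem.Str.split₀ stats).length ≤ 16 ∧
    ((PySem.Str.split₀ stats).all fun t => t.toList.all fun c => (pvVal? c).isSome) = true
instance (stats : String) : Decidable (Pre_decode_lstats stats) := by
  unfold Pre_decode_lstats; infer_instance

def pvWitness_decode_lstats : String := "BB CA"

def Spec_decode_lstats (stats : String) (out : List (String × Int)) : Prop := out = decode_lstats_alt stats
instance (stats : String) (out : List (String × Int)) : Decidable (Spec_decode_lstats stats out) := by unfold Spec_decode_lstats; infer_instance

-- ===== CLAIM (what is proved, stated in full; the proofs are below) =====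
def Claim_equal_decode_lstats : Prop := ∀ (stats : String), Dom_decode_lstats stats → Pre_decode_lstats stats → Spec_decode_lstats stats (decode_lstats stats)

-- ===== LEMMAS AND PROOFS =====

-- total digit value, used only by the proofs
def pvVal (c : Char) : Int := (pvVal? c).getD 0

-- A's Horner accumulator, as a pure fold
def pvHorner (a : Int) (l : List Char) : Int :=
  l.foldl (fun r c => r * 64 + pvVal c) a

theorem pvHorner_shift (l : List Char) : ∀ a : Int,
    pvHorner a l = a * 64 ^ l.length + pvHorner 0 l := by
  induction l with
  | nil => intro a; simp [pvHorner]
  | cons c l ih =>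
      intro a
      have h2 : pvHorner 0 (c :: l) = pvHorner (0 * 64 + pvVal c) l := rfl
      have h1 : pvHorner a (c :: l) = pvHorner (a * 64 + pvVal c) l := rfl
      rw [h1, h2, ih (a * 64 + pvVal c), ih (0 * 64 + pvVal c)]
      simp [List.length_cons]
      ring

-- the keys of B64_VALS, in source order
def pvB64Keys : List Char := pvB64.keys

-- on every key of B64_VALS the alphabet position equals the stored digit
theorem pvDigit_eq_of_key_bool :
    (pvB64Keys.all fun c => pvDigit? c == pvVal? c) = true := by rfl

theorem pvDigit_eq_of_key : ∀ c ∈ pvB64Keys, pvDigit? c = pvVal? c := by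
  intro c hc
  have := List.all_eq_true.mp pvDigit_eq_of_key_bool c hc
  exact eq_of_beq this

-- a valid char (B64_VALS lookup succeeds) has the same value in both programs
theorem pvDigit_eq (c : Char) (h : (pvVal? c).isSome) : pvDigit? c = pvVal? c := by
  apply pvDigit_eq_of_key
  have : ¬ pvVal? c = none := by intro hn; rw [hn] at h; exact Bool.noConfusion h
  have hm : c ∈ pvB64.keys := by
    by_contra hk
    exact this ((PySem.Dict.get?_eq_none_iff_not_mem_keys pvB64 c).mpr hk)
  exact hm

-- A's Option-propagating inner fold, characterised
theorem pvInnerA (l : List Char) : ∀ a : Int,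
    l.foldl (fun r letter => r.bind fun x => (pvVal? letter).map fun v => x * 64 + v)
        (some a)
      = if l.all (fun c => (pvVal? c).isSome) then some (pvHorner a l) else none := by
  induction l with
  | nil => intro a; simp [pvHorner]
  | cons c l ih =>
      intro a
      by_cases hc : (pvVal? c).isSome
      · obtain ⟨v, hv⟩ := Option.isSome_iff_exists.mp hc
        have hval : pvVal c = v := by simp [pvVal, hv]
        show List.foldl _ ((some a).bind fun x => (pvVal? c).map fun v => x * 64 + v) l = _
        rw [hv]
        simp only [Option.bind_some, Option.map_some]
        rw [ih (a * 64 + v)]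
        simp [List.all_cons, hc, pvHorner, hval]
      · have hnone : pvVal? c = none := Option.not_isSome_iff_eq_none.mp hc
        show List.foldl _ ((some a).bind fun x => (pvVal? c).map fun v => x * 64 + v) l = _
        rw [hnone]
        simp only [Option.map_none, Option.bind_some]
        have : ∀ m : List Char, m.foldl (fun (r : Option Int) letter => r.bind fun x => (pvVal? letter).map fun v => x * 64 + v) none = none := by
          intro m; induction m with
          | nil => rfl
          | cons d m ihm => exact ihm
        rw [this l]
        simp [List.all_cons, hc]

-- B's token value is A's Horner value on an all-valid token
theorem pvTokVal_eq (l : List Char) (h : l.all (fun c => (pvVal? c).isSome) = true) :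
    pvTokVal? l = some (pvHorner 0 l) := by
  suffices hgen : ∀ v m : Int,
      l.reverse.foldl
          (fun r ch => r.bind fun vm => (pvDigit? ch).map fun d => (vm.1 + d * vm.2, vm.2 * 64))
          (some (v, m))
        = some (v + pvHorner 0 l * m, m * 64 ^ l.length) by
    unfold pvTokVal?
    rw [hgen 0 1]
    simp
  induction l with
  | nil => intro v m; simp [pvHorner]
  | cons c l ih =>
      intro v m
      simp only [List.all_cons, Bool.and_eq_true] at h
      rw [List.reverse_cons, List.foldl_append, ih h.2 v m]
      obtain ⟨d, hd⟩ := Option.isSome_iff_exists.mp h.1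
      have hdig : pvDigit? c = some d := by rw [pvDigit_eq c h.1, hd]
      have hval : pvVal c = d := by simp [pvVal, hd]
      show ((some (v + pvHorner 0 l * m, m * 64 ^ l.length)).bind
          fun vm => (pvDigit? c).map fun d => (vm.1 + d * vm.2, vm.2 * 64)) = _
      rw [hdig]
      simp only [Option.bind_some, Option.map_some, Option.some.injEq]
      have h64 : pvHorner 0 (c :: l) = pvVal c * 64 ^ l.length + pvHorner 0 l := by
        show pvHorner (0 * 64 + pvVal c) l = _
        rw [pvHorner_shift l (0 * 64 + pvVal c)]; ring
      rw [h64, hval]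
      simp [List.length_cons]
      constructor <;> ring

-- the pure (field, value) pair list both final dicts are made of
def pvPairsPure (fs ts : List String) : List (String × Int) :=
  (fs.zip ts).map fun p => (p.1, pvHorner 0 p.2.toList)

-- B's recursion produces exactly that pair list when the tokens fit and are valid
theorem pvPairs_eq : ∀ (ts fs : List String), ts.length ≤ fs.length →
    (ts.all fun t => t.toList.all fun c => (pvVal? c).isSome) = true →
    pvPairs? fs ts = some (pvPairsPure fs ts) := by
  intro ts
  induction ts with
  | nil => intro fs _ _; cases fs <;> rfl
  | cons t ts ih =>
      intro fs hlen hv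
      cases fs with
      | nil => simp at hlen
      | cons f fs =>
          simp only [List.all_cons, Bool.and_eq_true] at hv
          simp only [List.length_cons, Nat.add_le_add_iff_right] at hlen
          show ((PySem.List.pyGet? (f :: fs) 0).bind fun g =>
              (pvTokVal? t.toList).bind fun v =>
                (pvPairs? (PySem.List.slice (f :: fs) (some 1) none) ts).map
                  fun rest => (g, v) :: rest) = _
          rw [PySem.List.pyGet?_zero_cons, PySem.List.slice_from_one]
          simp only [Option.bind_some, List.tail_cons]
          rw [pvTokVal_eq t.toList hv.1, ih fs hlen hv.2]
          simp [pvPairsPure]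

-- A's enumerate fold, characterised: it performs the same inserts, indexed
theorem pvFoldA_eq : ∀ (ts : List String) (i : Nat) (d : PySem.Dict String Int),
    i + ts.length ≤ pvFields.length →
    (ts.all fun t => t.toList.all fun c => (pvVal? c).isSome) = true →
    (PySem.List.enumerate ts (i : Int)).foldl pvStepA (some d)
      = some (((pvFields.drop i).zip ts).foldl
          (fun d p => d.insert p.1 (pvHorner 0 p.2.toList)) d) := by
  intro ts
  induction ts with
  | nil => intro i d _ _; simp [PySem.List.enumerate_nil]
  | cons t ts ih =>
      intro i d hlen hv
      simp only [List.all_cons, Bool.and_eq_true] at hv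
      simp only [List.length_cons] at hlen
      have hi : i < pvFields.length := by omega
      rw [PySem.List.enumerate_cons]
      have hstep : pvStepA (some d) ((i : Int), t)
          = some (d.insert pvFields[i] (pvHorner 0 t.toList)) := by
        show ((some d).bind fun out =>
            (t.toList.foldl _ (some 0)).bind fun result =>
              (PySem.List.pyGet? pvFields (i : Int)).map fun f => out.insert f result) = _
        rw [Option.bind_some, pvInnerA t.toList 0, if_pos hv.1]
        rw [Option.bind_some, PySem.List.pyGet?_natCast, List.getElem?_eq_getElem hi]
        rfl
      rw [List.foldl_cons, hstep]
      have hcast : (i : Int) + 1 = ((i + 1 : Nat) : Int) := by push_cast; ring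
      rw [hcast, ih (i + 1) _ (by omega) hv.2]
      rw [← List.getElem_cons_drop hi, List.zip_cons_cons, List.foldl_cons]

-- the mapped first components of a zip form a sublist of the first list
theorem pvZipFstSublist {α β : Type} : ∀ (l1 : List α) (l2 : List β),
    ((l1.zip l2).map Prod.fst).Sublist l1 := by
  intro l1
  induction l1 with
  | nil => intro l2; simp
  | cons x l1 ih =>
      intro l2
      cases l2 with
      | nil => simp
      | cons y l2 => simpa using List.Sublist.cons₂ x (ih l2)

theorem pvFieldsNodup : pvFields.Nodup := by decide

-- ===== VERDICT (by name: the statement is the Claim_ definition above) =====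
theorem decode_lstats_spec : Claim_equal_decode_lstats := by
  intro stats _ hpre
  obtain ⟨hlen, hv⟩ := hpre
  show decode_lstats stats = decode_lstats_alt stats
  unfold decode_lstats decode_lstats_alt
  have hnodup : ((pvFields.zip (PySem.Str.split₀ stats)).map Prod.fst).Nodup :=
    pvFieldsNodup.sublist (pvZipFstSublist pvFields (PySem.Str.split₀ stats))
  have hA := pvFoldA_eq (PySem.Str.split₀ stats) 0 PySem.Dict.empty
      (by simpa using hlen) hv
  have hB := pvPairs_eq (PySem.Str.split₀ stats) pvFields (by simpa using hlen) hv
  rw [show ((0 : Nat) : Int) = (0 : Int) from rfl] at hA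
  rw [hA, hB]
  simp only [List.drop_zero] at hA ⊢
  rw [Option.map_some, Option.map_some, Option.getD_some, Option.getD_some]
  rw [PySem.Dict.items_foldl_insert_fresh _ Prod.fst
        (fun p => pvHorner 0 p.2.toList) PySem.Dict.empty
        (fun a _ => PySem.Dict.contains_empty _) hnodup]
  show PySem.Dict.empty.items ++ _ = (PySem.Dict.ofList (pvPairsPure pvFields (PySem.Str.split₀ stats))).items
  rw [show (PySem.Dict.ofList (pvPairsPure pvFields (PySem.Str.split₀ stats)))
        = (pvPairsPure pvFields (PySem.Str.split₀ stats)).foldl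
            (fun acc p => acc.insert p.1 p.2) PySem.Dict.empty from rfl]
  rw [PySem.Dict.items_foldl_insert_fresh _ Prod.fst Prod.snd PySem.Dict.empty
        (fun a _ => PySem.Dict.contains_empty _)
        (by simpa [pvPairsPure, List.map_map] using hnodup)]
  simp [pvPairsPure, List.map_map]
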